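-- pv_equiv track=rewrite | github.com/iran95cere/envchain-cli | envchain/env_duplicates.py | detect_across
-- ===== SOURCE A (Python) =====
-- from typing import Dict, List, Tuple
--
-- def detect_across(
--     profiles: Dict[str, Dict[str, str]]
-- ) -> List[Tuple[str, str, List[str]]]:
--     """Find (value, var_name) pairs shared across multiple profiles.
--
--     Returns list of (value, var_name, [profile, ...]) tuples where the
--     same variable name has the same value in more than one profile.
--     """
--     # key: (var_name, value) -> list of profile names
--     mapping: Dict[Tuple[str, str], List[str]] = {}
--     for profile_name, variables in profiles.items():
--         for var_name, value in variables.items():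
--             mapping.setdefault((var_name, value), []).append(profile_name)
--
--     results = [
--         (value, var_name, sorted(profile_list))
--         for (var_name, value), profile_list in mapping.items()
--         if len(profile_list) > 1
--     ]
--     results.sort(key=lambda t: (t[1], t[0]))
--     return results
-- ===== SOURCE B (Python) =====
-- def detect_across(profiles):
--     """Find (value, var_name) pairs shared across multiple profiles.
--
--     Sort the flattened (var, value, profile) triples by (var, value), then
--     scan the sorted list once, collecting each run of equal (var, value)
--     keys; runs spanning more than one entry are emitted in place, so the
--     output is already in the required (var_name, value) order.
--     """
--     triples = sorted(
--         ((var_name, value, profile_name)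
--          for profile_name, variables in profiles.items()
--          for var_name, value in variables.items()),
--         key=lambda t: (t[0], t[1]),
--     )
--     out = []
--     i, n = 0, len(triples)
--     while i < n:
--         var_name, value = triples[i][0], triples[i][1]
--         j = i
--         profs = []
--         while j < n and triples[j][0] == var_name and triples[j][1] == value:
--             profs.append(triples[j][2])
--             j += 1
--         if len(profs) > 1:
--             out.append((value, var_name, sorted(profs)))
--         i = j
--     return out
-- ===== Notes on version B (the rewrite author's own statement) =====
-- stated objective: alternative
-- what changed: Replaces A's dict-of-(var,value)-groups plus a final sort of the results with a sort of the flattened (var,value,profile) triples followed by a single run-scan that emits multi-profile runs already in output order, with no dictionary and no final sort.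
import Mathlib
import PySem

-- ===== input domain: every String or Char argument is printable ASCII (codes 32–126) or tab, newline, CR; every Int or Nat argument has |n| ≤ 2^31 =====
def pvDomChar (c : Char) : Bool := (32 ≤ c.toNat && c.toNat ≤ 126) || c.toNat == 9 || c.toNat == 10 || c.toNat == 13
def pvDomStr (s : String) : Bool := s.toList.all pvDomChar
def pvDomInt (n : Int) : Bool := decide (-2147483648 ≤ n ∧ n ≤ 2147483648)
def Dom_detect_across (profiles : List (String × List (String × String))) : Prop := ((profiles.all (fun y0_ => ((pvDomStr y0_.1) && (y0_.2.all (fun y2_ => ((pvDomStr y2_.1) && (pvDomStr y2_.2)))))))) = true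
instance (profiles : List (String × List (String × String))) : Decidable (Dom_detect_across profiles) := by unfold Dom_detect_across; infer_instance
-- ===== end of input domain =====

-- B replaces A's dict grouping followed by a final sort of the results with one sort of the
-- flattened (var, value, profile) triples followed by a single run-scan (objective: alternative).

-- ===== PORT A =====
-- mapping.setdefault((var, value), []).append(profile)  =  modify (var, value) [] (· ++ [profile])
def detect_across (profiles : List (String × List (String × String))) :
    List (String × String × List String) :=
  let mapping : PySem.Dict (String × String) (List String) :=
    profiles.foldl
      (fun d p => p.2.foldl (fun d q => d.modify (q.1, q.2) [] (fun l => l ++ [p.1])) d)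
      PySem.Dict.empty
  let results :=
    (mapping.items.filter (fun kv => decide (1 < kv.2.length))).map
      (fun kv => (kv.1.2, kv.1.1, PySem.List.sorted kv.2 (fun x => x) false))
  PySem.List.sorted2 results (fun t => t.2.1) (fun t => t.1) false

-- ===== PORT B =====
-- the inner while loop of Source B: collect the run of triples sharing the head's (var, value)
-- key, then continue right after the run (j walking the run = takeWhile / dropWhile on the tail)
def pvGroup : List (String × String × String) → List ((String × String) × List String)
  | [] => []
  | t :: rest =>
    ((t.1, t.2.1), t.2.2 :: (rest.takeWhile (fun u => (u.1, u.2.1) == (t.1, t.2.1))).map (fun u => u.2.2)) ::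
      pvGroup (rest.dropWhile (fun u => (u.1, u.2.1) == (t.1, t.2.1)))
termination_by s => s.length
decreasing_by
  simpa using Nat.lt_succ_of_le (List.length_dropWhile_le _ _)

def detect_across_alt (profiles : List (String × List (String × String))) :
    List (String × String × List String) :=
  let triples := profiles.flatMap (fun p => p.2.map (fun q => (q.1, q.2, p.1)))
  let ts := PySem.List.sorted2 triples (fun t => t.1) (fun t => t.2.1) false
  (pvGroup ts).foldl
    (fun acc g =>
      if 1 < g.2.length then
        acc ++ [(g.1.2, g.1.1, PySem.List.sorted g.2 (fun x => x) false)]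
      else acc) []

-- ===== PRECONDITION & SPEC =====
def Spec_detect_across (profiles : List (String × List (String × String))) (out : List (String × String × List String)) : Prop := out = detect_across_alt profiles
instance (profiles : List (String × List (String × String))) (out : List (String × String × List String)) : Decidable (Spec_detect_across profiles out) := by unfold Spec_detect_across; infer_instance

-- ===== CLAIM (what is proved, stated in full; the proofs are below) =====
def Claim_equal_detect_across : Prop := ∀ (profiles : List (String × List (String × String))), Dom_detect_across profiles → Spec_detect_across profiles (detect_across profiles)

-- ===== LEMMAS AND PROOFS =====

-- the (var, value) key of a flattened triple, and its lexicographic version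
def pvKey (t : String × String × String) : String × String := (t.1, t.2.1)
def pvLK (t : String × String × String) : Lex (String × String) := toLex (t.1, t.2.1)
-- the flattened triples, the profile names grouped per key, and A's result list pvR
def pvT (profiles : List (String × List (String × String))) : List (String × String × String) :=
  profiles.flatMap (fun p => p.2.map (fun q => (q.1, q.2, p.1)))
def pvTgrp (T : List (String × String × String)) (k : String × String) : List String :=
  (T.filter (fun t => pvKey t == k)).map (fun t => t.2.2)
def pvP (T : List (String × String × String)) (k : String × String) : Bool :=
  decide (1 < (pvTgrp T k).length)
def pvE (T : List (String × String × String)) (k : String × String) :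
    String × String × List String :=
  (k.2, k.1, PySem.List.sorted (pvTgrp T k) (fun x => x) false)
def pvR (T : List (String × String × String)) : List (String × String × List String) :=
  ((PySem.Set.ofList (T.map pvKey)).filter (pvP T)).map (pvE T)
def pvKeyE (e : String × String × List String) : Lex (String × String) := toLex (e.2.1, e.1)

-- Python's sorted(…, key=lambda x: (k1(x), k2(x))) is a sort by the lexicographic product key
theorem pv_sorted2_eq_sorted_lex {α : Type} (xs : List α) (k1 k2 : α → String) :
    PySem.List.sorted2 xs k1 k2 false
      = PySem.List.sorted xs (fun x => toLex (k1 x, k2 x)) false := by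
  have h : (fun (a b : α) =>
      (decide (k1 a < k1 b) || (!decide (k1 b < k1 a) && decide (k2 a < k2 b))))
        = fun a b => decide (toLex (k1 a, k2 a) < toLex (k1 b, k2 b)) := by
    funext a b
    rcases lt_trichotomy (k1 a) (k1 b) with hlt | heq | hgt
    · simp [hlt, Prod.Lex.toLex_lt_toLex]
    · simp [heq, Prod.Lex.toLex_lt_toLex]
    · simp [hgt.ne', Prod.Lex.toLex_lt_toLex, hgt]
  show List.foldl (fun acc x => PySem.List.insertBy _ x acc) [] xs
     = List.foldl (fun acc x => PySem.List.insertBy _ x acc) [] xs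
  rw [h]

theorem pv_toLex_lt_of_le_of_ne (k : String × String) (u : String × String × String)
    (hle : toLex k ≤ pvLK u) (hne : pvKey u ≠ k) : toLex k < pvLK u := by
  rcases lt_or_eq_of_le hle with h | h
  · exact h
  · exact absurd (toLex.injective h.symm) (by simpa [pvKey, pvLK] using hne)

-- after dropping the head's run, no element carries the head's key (keys are sorted)
theorem pv_dropWhile_key_ne (k : String × String) (rest : List (String × String × String))
    (hle : ∀ u ∈ rest, toLex k ≤ pvLK u)
    (hs : rest.Pairwise (fun a b => pvLK a ≤ pvLK b)) :
    ∀ u ∈ rest.dropWhile (fun u => (u.1, u.2.1) == k), pvKey u ≠ k := by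
  induction rest with
  | nil => simp
  | cons r rs ih =>
    rw [List.pairwise_cons] at hs
    by_cases hr : ((r.1, r.2.1) == k) = true
    · rw [List.dropWhile_cons, if_pos hr]
      exact ih (fun u hu => hle u (List.mem_cons_of_mem _ hu)) hs.2
    · rw [List.dropWhile_cons, if_neg hr]
      have hrk : pvKey r ≠ k := by simpa [pvKey] using hr
      have hlt : toLex k < pvLK r :=
        pv_toLex_lt_of_le_of_ne k r (hle r (List.mem_cons_self)) hrk
      intro u hu
      rcases List.mem_cons.mp hu with rfl | hu
      · exact hrk
      · intro hcontra
        have : pvLK r ≤ pvLK u := hs.1 u hu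
        have : toLex k < pvLK u := lt_of_lt_of_le hlt this
        rw [show pvLK u = toLex (pvKey u) from rfl, hcontra] at this
        exact lt_irrefl _ this

-- characterisation of the run-scan on a key-sorted list: each group is exactly the filter by
-- its key, group keys are strictly increasing, and they are the keys occurring in the list
theorem pvGroup_spec (S : List (String × String × String))
    (hs : S.Pairwise (fun a b => pvLK a ≤ pvLK b)) :
    (∀ g ∈ pvGroup S, g.2 = (S.filter (fun t => pvKey t == g.1)).map (fun t => t.2.2)) ∧
    (pvGroup S).Pairwise (fun a b => toLex a.1 < toLex b.1) ∧
    (∀ k, k ∈ (pvGroup S).map (fun g => g.1) ↔ k ∈ S.map pvKey) := by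
  induction S using pvGroup.induct with
  | case1 => simp [pvGroup]
  | case2 t rest ih =>
    rw [List.pairwise_cons] at hs
    obtain ⟨hle, hrest⟩ := hs
    set k : String × String := (t.1, t.2.1) with hk
    set tw := rest.takeWhile (fun u => (u.1, u.2.1) == k) with htwdef
    set dw := rest.dropWhile (fun u => (u.1, u.2.1) == k) with hdwdef
    have hdw_sub : dw.Sublist rest := by rw [hdwdef]; exact List.dropWhile_sublist _
    have hdw_sorted : dw.Pairwise (fun a b => pvLK a ≤ pvLK b) :=
      List.Pairwise.sublist hdw_sub hrest
    have hne : ∀ u ∈ dw, pvKey u ≠ k := pv_dropWhile_key_ne k rest hle hrest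
    have htw : ∀ u ∈ tw, pvKey u = k := by
      intro u hu
      have := List.mem_takeWhile_imp (htwdef ▸ hu)
      simpa [pvKey] using this
    have hsplit : tw ++ dw = rest := List.takeWhile_append_dropWhile
    have hlt : ∀ u ∈ dw, toLex k < pvLK u := fun u hu =>
      pv_toLex_lt_of_le_of_ne k u (hle u (hdw_sub.subset hu)) (hne u hu)
    obtain ⟨ih1, ih2, ih3⟩ := ih hdw_sorted
    have hmemkey : ∀ g ∈ pvGroup dw, ∃ u ∈ dw, pvKey u = g.1 := by
      intro g hg
      have : g.1 ∈ dw.map pvKey := (ih3 g.1).mp (List.mem_map_of_mem hg)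
      obtain ⟨u, hu, he⟩ := List.mem_map.mp this
      exact ⟨u, hu, he⟩
    have hgne : ∀ g ∈ pvGroup dw, g.1 ≠ k := by
      intro g hg
      obtain ⟨u, hu, he⟩ := hmemkey g hg
      exact he ▸ hne u hu
    have hglt : ∀ g ∈ pvGroup dw, toLex k < toLex g.1 := by
      intro g hg
      obtain ⟨u, hu, he⟩ := hmemkey g hg
      exact he ▸ hlt u hu
    rw [show pvGroup (t :: rest)
        = (k, t.2.2 :: tw.map (fun u => u.2.2)) :: pvGroup dw from by
      rw [pvGroup]]
    refine ⟨?_, ?_, ?_⟩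
    · intro g hg
      rcases List.mem_cons.mp hg with rfl | hg
      · -- head group: the filter by the head's key is exactly t followed by its run
        have hfilter : (t :: rest).filter (fun u => pvKey u == k) = t :: tw := by
          rw [← hsplit, List.filter_cons]
          have hT : (pvKey t == k) = true := by simp [pvKey, hk]
          rw [if_pos hT, List.filter_append,
            List.filter_eq_self.mpr (fun u hu => by simp [htw u hu]),
            List.filter_eq_nil_iff.mpr (fun u hu => by simp [hne u hu])]
          simp
        simpa using congrArg (List.map (fun t => t.2.2)) hfilter.symm
      · have h1 := ih1 g hg
        have hkne := hgne g hg
        have hfilter : (t :: rest).filter (fun u => pvKey u == g.1)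
            = dw.filter (fun u => pvKey u == g.1) := by
          rw [← hsplit, List.filter_cons]
          have hT : (pvKey t == g.1) = false := by
            simp [pvKey, ← hk]; exact fun h => hkne h.symm
          rw [if_neg (by simp [hT]), List.filter_append,
            List.filter_eq_nil_iff.mpr (fun u hu => by
              simp [htw u hu]; exact fun h => hkne h.symm)]
          simp
        rw [h1, hfilter]
    · exact List.pairwise_cons.mpr ⟨fun g hg => hglt g hg, ih2⟩
    · intro k'
      simp only [List.map_cons, List.mem_cons, ih3]
      constructor
      · rintro (rfl | h)
        · exact Or.inl rfl
        · rw [← hsplit] at *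
          simp only [List.map_append, List.mem_append] at *
          exact Or.inr (Or.inr (by simpa using h))
      · rintro (rfl | h)
        · exact Or.inl rfl
        · rw [← hsplit, List.map_append, List.mem_append] at h
          rcases h with h | h
          · obtain ⟨u, hu, he⟩ := List.mem_map.mp h
            exact Or.inl (by rw [← he, htw u hu])
          · exact Or.inr (by simpa using h)

-- A's result is the sort (by the lexicographic (var, value) key) of the grouped entries pvR
theorem pv_A_eq (profiles : List (String × List (String × String))) :
    detect_across profiles = PySem.List.sorted (pvR (pvT profiles)) pvKeyE false := by
  have hfold :
      profiles.foldl
        (fun d p => p.2.foldl (fun d q => d.modify (q.1, q.2) [] (fun l => l ++ [p.1])) d)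
        PySem.Dict.empty
      = (pvT profiles).foldl
          (fun d t => d.modify (pvKey t) [] (fun l => l ++ [t.2.2])) PySem.Dict.empty := by
    simp [pvT, List.foldl_flatMap, List.foldl_map, pvKey]
  have hnodup :
      ((pvT profiles).foldl
        (fun d t => d.modify (pvKey t) [] (fun l => l ++ [t.2.2])) PySem.Dict.empty).keys.Nodup :=
    PySem.Dict.nodup_keys_foldl_modify_key (pvT profiles) pvKey []
      (fun _ t => fun l => l ++ [t.2.2]) PySem.Dict.empty (by simp)
  have hkeys :
      ((pvT profiles).foldl
        (fun d t => d.modify (pvKey t) [] (fun l => l ++ [t.2.2])) PySem.Dict.empty).keys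
      = PySem.Set.ofList ((pvT profiles).map pvKey) := by
    rw [PySem.Dict.keys_foldl_modify_key (pvT profiles) pvKey []
      (fun _ t => fun l => l ++ [t.2.2]) PySem.Dict.empty]
    rfl
  have hgetD : ∀ k,
      ((pvT profiles).foldl
        (fun d t => d.modify (pvKey t) [] (fun l => l ++ [t.2.2])) PySem.Dict.empty).getD k []
      = pvTgrp (pvT profiles) k := by
    intro k
    have := PySem.Dict.getD_foldl_modify_append
      ((pvT profiles).map (fun t => (pvKey t, t.2.2))) PySem.Dict.empty k
    rw [List.foldl_map] at this
    simpa [pvTgrp, List.filter_map, Function.comp] using this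
  have hitems :
      ((pvT profiles).foldl
        (fun d t => d.modify (pvKey t) [] (fun l => l ++ [t.2.2])) PySem.Dict.empty).items
      = (PySem.Set.ofList ((pvT profiles).map pvKey)).map
          (fun k => (k, pvTgrp (pvT profiles) k)) := by
    rw [PySem.Dict.items_eq_map_keys _ hnodup [], hkeys]
    exact List.map_congr_left (fun k _ => by rw [hgetD k])
  show PySem.List.sorted2 _ _ _ false = _
  rw [hfold, hitems, pv_sorted2_eq_sorted_lex]
  congr 1
  rw [List.filter_map, List.map_map]
  rfl

-- B's result is a permutation of pvR, already strictly increasing in the output sort key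
theorem pv_B_eq (profiles : List (String × List (String × String))) :
    (detect_across_alt profiles).Perm (pvR (pvT profiles)) ∧
    (detect_across_alt profiles).Pairwise (fun a b => pvKeyE a < pvKeyE b) := by
  set T := pvT profiles with hTdef
  set S := PySem.List.sorted2 T (fun t => t.1) (fun t => t.2.1) false with hSdef
  have hSsorted2 : S = PySem.List.sorted T pvLK false := by
    rw [hSdef, pv_sorted2_eq_sorted_lex]; rfl
  have hsorted : S.Pairwise (fun a b => pvLK a ≤ pvLK b) := by
    rw [hSsorted2]; exact PySem.List.sorted_pairwise T pvLK
  have hperm : S.Perm T := PySem.List.sorted2_perm T _ _ false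
  obtain ⟨g1, g2, g3⟩ := pvGroup_spec S hsorted
  have hgrpperm : ∀ k,
      ((S.filter (fun t => pvKey t == k)).map (fun t => t.2.2)).Perm (pvTgrp T k) :=
    fun k => (hperm.filter _).map _
  have hshape : detect_across_alt profiles
      = (((pvGroup S).map (fun g => g.1)).filter (pvP T)).map (pvE T) := by
    show (pvGroup S).foldl _ [] = _
    rw [PySem.List.foldl_append_ite (fun g => 1 < g.2.length)
      (fun g => (g.1.2, g.1.1, PySem.List.sorted g.2 (fun x => x) false)) (pvGroup S) []]
    rw [List.nil_append]
    have hmemlen : ∀ g ∈ pvGroup S, (decide (1 < g.2.length)) = pvP T g.1 := by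
      intro g hg
      rw [g1 g hg, pvP, (hgrpperm g.1).length_eq]
    have hmemE : ∀ g ∈ (pvGroup S).filter (fun g => decide (1 < g.2.length)),
        (g.1.2, g.1.1, PySem.List.sorted g.2 (fun x => x) false) = pvE T g.1 := by
      intro g hg
      rw [g1 g (List.mem_of_mem_filter hg), pvE,
        PySem.List.sorted_eq_sorted_of_perm _ _ (fun x => x) Function.injective_id (hgrpperm g.1)]
    rw [List.map_congr_left hmemE, List.filter_congr hmemlen, List.filter_map, List.map_map]
    rfl
  have hKBpw : ((pvGroup S).map (fun g => g.1)).Pairwise (fun a b => toLex a < toLex b) :=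
    List.pairwise_map.mpr g2
  have hKBnodup : ((pvGroup S).map (fun g => g.1)).Nodup :=
    hKBpw.imp (fun h => fun he => absurd (he ▸ h) (lt_irrefl _))
  have hKBperm : ((pvGroup S).map (fun g => g.1)).Perm (PySem.Set.ofList (T.map pvKey)) := by
    rw [List.perm_ext_iff_of_nodup hKBnodup (PySem.Set.nodup_ofList _)]
    intro k
    rw [PySem.Set.mem_ofList, g3 k, (hperm.map pvKey).mem_iff]
  constructor
  · rw [hshape, pvR]
    exact ((hKBperm.filter (pvP T)).map (pvE T))
  · rw [hshape]
    refine List.pairwise_map.mpr ?_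
    have hsub : (((pvGroup S).map (fun g => g.1)).filter (pvP T)).Sublist
        ((pvGroup S).map (fun g => g.1)) := List.filter_sublist
    exact (List.Pairwise.sublist hsub hKBpw).imp (fun {a b} h => h)

-- ===== VERDICT (by name: the statement is the Claim_ definition above) =====
theorem detect_across_spec : Claim_equal_detect_across := by
  intro profiles _
  unfold Spec_detect_across
  obtain ⟨hperm, hpw⟩ := pv_B_eq profiles
  rw [pv_A_eq]
  exact PySem.List.sorted_eq_of_perm_of_pairwise_lt _ _ pvKeyE hperm hpw
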